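-- pv_equiv track=rewrite | github.com/vortydev/sanctum-library | scanner.py | extract_unique_genres
-- ===== SOURCE A (Python) =====
-- def extract_unique_genres(genres: list[str]) -> list[str]:
--     seen: set[str] = set()
--     out: list[str] = []
--     for genre in genres or []:
--         for sub in (genre or "").split(","):
--             g = sub.strip().lower()
--             if g and g not in seen:
--                 seen.add(g)
--                 out.append(g.capitalize())
--     return sorted(out)
-- ===== SOURCE B (Python) =====
-- def extract_unique_genres(genres: list[str]) -> list[str]:
--     toks = sorted(p.strip().lower().capitalize()
--                   for g in (genres or []) for p in (g or "").split(","))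
--     out: list[str] = []
--     for t in toks:
--         if t and (not out or out[-1] != t):
--             out.append(t)
--     return out
-- ===== Notes on version B (the rewrite author's own statement) =====
-- stated objective: alternative
-- what changed: Replaces A's seen-set with first-occurrence dedup followed by a final sort by a single pass that sorts the flat list of capitalized tokens first and then removes adjacent duplicates (and empty tokens) in one left-to-right scan.
import Mathlib
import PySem

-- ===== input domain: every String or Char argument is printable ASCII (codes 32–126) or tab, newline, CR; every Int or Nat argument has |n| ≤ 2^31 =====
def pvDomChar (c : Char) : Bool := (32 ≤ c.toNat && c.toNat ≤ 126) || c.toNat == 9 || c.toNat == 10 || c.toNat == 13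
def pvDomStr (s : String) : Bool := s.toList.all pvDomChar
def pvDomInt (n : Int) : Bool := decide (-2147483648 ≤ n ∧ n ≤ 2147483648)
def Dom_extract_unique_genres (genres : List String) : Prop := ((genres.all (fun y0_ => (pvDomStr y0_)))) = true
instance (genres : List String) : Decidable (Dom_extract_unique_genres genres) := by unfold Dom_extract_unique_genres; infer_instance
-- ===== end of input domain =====

-- B sorts the flat list of capitalized tokens and removes adjacent duplicates (and empties) in
-- one scan, instead of A's seen-set dedup followed by a final sort (objective: alternative).

-- ===== PORT A =====
-- genre.split(",")  (sep "," is nonempty, so Str.split? is always `some`; the getD default is unreachable)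
def pySplitComma (s : String) : List String := (PySem.Str.split? s ",").getD []

-- s.capitalize() — first char upper-cased, rest lower-cased (exact on ASCII, where title-case = upper-case)
def pyCapitalize (s : String) : String :=
  match s.toList with
  | [] => ""
  | c :: rest => String.ofList (PySem.Chars.upperChar c :: PySem.Chars.lower rest)

def extract_unique_genres (genres : List String) : List String :=
  -- `genres or []` iterates exactly like genres; `genre or ""` behaves like genre ("" stays "")
  let st := genres.foldl (fun (st : PySem.Set String × List String) genre =>
    (pySplitComma genre).foldl (fun st sub =>
      let g := PySem.Str.lower (PySem.Str.strip sub)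
      if g ≠ "" ∧ ¬ (PySem.Set.contains st.1 g = true) then
        (PySem.Set.add st.1 g, st.2 ++ [pyCapitalize g])
      else st) st) (PySem.Set.empty, [])
  PySem.List.sorted st.2 (fun x => x)

-- ===== PORT B =====
def extract_unique_genres_alt (genres : List String) : List String :=
  let toks := PySem.List.sorted
    (genres.flatMap (fun g =>
      (pySplitComma g).map (fun p => pyCapitalize (PySem.Str.lower (PySem.Str.strip p)))))
    (fun x => x)
  -- `out[-1]` is out.getLast? (only compared under the guard `out ≠ []`, as in Python's short-circuit)
  toks.foldl (fun out t =>
    if t ≠ "" ∧ (out = [] ∨ out.getLast? ≠ some t) then out ++ [t] else out) []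

-- ===== PRECONDITION & SPEC =====
def Spec_extract_unique_genres (genres : List String) (out : List String) : Prop := out = extract_unique_genres_alt genres
instance (genres : List String) (out : List String) : Decidable (Spec_extract_unique_genres genres out) := by unfold Spec_extract_unique_genres; infer_instance

-- ===== CLAIM (what is proved, stated in full; the proofs are below) =====
def Claim_equal_extract_unique_genres : Prop := ∀ (genres : List String), Dom_extract_unique_genres genres → Spec_extract_unique_genres genres (extract_unique_genres genres)

-- ===== LEMMAS AND PROOFS =====

-- the flat list of normalized (stripped, lowercased) tokens
def pvTok (s : String) : String := PySem.Str.lower (PySem.Str.strip s)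
def pvToks (genres : List String) : List String :=
  genres.flatMap (fun g => (pySplitComma g).map pvTok)
def pvF (genres : List String) : List String := (pvToks genres).filter (fun g => g ≠ "")

-- A's loop body, seen as a step per normalized token
def pvStepA (st : PySem.Set String × List String) (g : String) : PySem.Set String × List String :=
  if g ≠ "" ∧ ¬ (PySem.Set.contains st.1 g = true) then
    (PySem.Set.add st.1 g, st.2 ++ [pyCapitalize g])
  else st

theorem pvA_flat (genres : List String) (st : PySem.Set String × List String) :
    genres.foldl (fun st genre =>
      (pySplitComma genre).foldl (fun st sub =>
        let g := PySem.Str.lower (PySem.Str.strip sub)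
        if g ≠ "" ∧ ¬ (PySem.Set.contains st.1 g = true) then
          (PySem.Set.add st.1 g, st.2 ++ [pyCapitalize g])
        else st) st) st
    = (pvToks genres).foldl pvStepA st := by
  induction genres generalizing st with
  | nil => rfl
  | cons g rest ih =>
      simp only [List.foldl_cons, pvToks, List.flatMap_cons, List.foldl_append, ih, List.foldl_map]
      rfl

theorem pvA_pair (L : List String) (seen : List String) :
    L.foldl pvStepA (seen, seen.map pyCapitalize)
    = ((L.filter (fun g => g ≠ "")).foldl PySem.Set.add seen,
       ((L.filter (fun g => g ≠ "")).foldl PySem.Set.add seen).map pyCapitalize) := by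
  induction L generalizing seen with
  | nil => rfl
  | cons g rest ih =>
      by_cases hg : g = ""
      · subst hg; simpa [pvStepA] using ih seen
      · by_cases hc : PySem.Set.contains seen g = true
        · have hm : g ∈ seen := by simpa [PySem.Set.contains] using hc
          have hadd : PySem.Set.add seen g = seen := by simp [PySem.Set.add, PySem.Set.contains, hm]
          have hstep : pvStepA (seen, seen.map pyCapitalize) g = (seen, seen.map pyCapitalize) := by
            simp [pvStepA, hg, PySem.Set.contains, hm]
          rw [List.foldl_cons, hstep, List.filter_cons_of_pos (by simp [hg]), List.foldl_cons, hadd]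
          exact ih seen
        · have hm : g ∉ seen := by simpa [PySem.Set.contains] using hc
          have hadd : PySem.Set.add seen g = seen ++ [g] := by simp [PySem.Set.add, PySem.Set.contains, hm]
          have hstep : pvStepA (seen, seen.map pyCapitalize) g
              = (seen ++ [g], (seen ++ [g]).map pyCapitalize) := by
            simp [pvStepA, hg, PySem.Set.contains, hm]
          rw [List.foldl_cons, hstep, List.filter_cons_of_pos (by simp [hg]), List.foldl_cons, hadd]
          exact ih (seen ++ [g])

theorem pvA_closed (genres : List String) :
    extract_unique_genres genres
    = PySem.List.sorted ((PySem.Set.ofList (pvF genres)).map pyCapitalize) (fun x => x) := by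
  unfold extract_unique_genres
  rw [pvA_flat]
  have h0 : ((PySem.Set.empty : PySem.Set String), ([] : List String))
      = (([] : List String), ([] : List String).map pyCapitalize) := rfl
  rw [h0, pvA_pair]
  rfl

-- B's loop body
def pvStepB (out : List String) (t : String) : List String :=
  if t ≠ "" ∧ (out = [] ∨ out.getLast? ≠ some t) then out ++ [t] else out

theorem pv_le_getLast {l : List String} {a : String} (hp : l.Pairwise (· < ·))
    (ha : a ∈ l) {b : String} (hb : l.getLast? = some b) : a ≤ b := by
  induction l generalizing a with
  | nil => cases ha
  | cons x xs ih =>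
      cases xs with
      | nil =>
          simp at hb ha; subst hb; simp [ha]
      | cons y ys =>
          rw [List.getLast?_cons_cons] at hb
          rcases List.mem_cons.mp ha with h | h
          · subst h
            have hxy : a < y := (List.pairwise_cons.mp hp).1 y (by simp)
            have hyb : y ≤ b := ih (List.pairwise_cons.mp hp).2 (by simp) hb
            exact le_of_lt (lt_of_lt_of_le hxy hyb)
          · exact ih (List.pairwise_cons.mp hp).2 h hb

theorem pvB_fold (ys : List String) : ∀ (acc : List String),
    acc.Pairwise (· < ·) → (∀ a ∈ acc, ∀ y ∈ ys, a ≤ y) → ys.Pairwise (· ≤ ·) →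
    (ys.foldl pvStepB acc).Pairwise (· < ·) ∧
      ∀ x, (x ∈ ys.foldl pvStepB acc ↔ x ∈ acc ∨ (x ∈ ys ∧ x ≠ "")) := by
  induction ys with
  | nil => intro acc h1 _ _; exact ⟨h1, fun x => by simp⟩
  | cons t ts ih =>
      intro acc h1 h2 h3
      rw [List.foldl_cons]
      by_cases ht : t ≠ "" ∧ (acc = [] ∨ acc.getLast? ≠ some t)
      · have hstep : pvStepB acc t = acc ++ [t] := by simp only [pvStepB, if_pos ht]
        rw [hstep]
        have hlt : ∀ a ∈ acc, a < t := by
          intro a ha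
          have hle : a ≤ t := h2 a ha t (by simp)
          rcases ht.2 with hnil | hlast
          · subst hnil; cases ha
          · have hne : a ≠ t := by
              intro h; subst h
              obtain ⟨b, hb⟩ : ∃ b, acc.getLast? = some b := by
                cases acc with
                | nil => cases ha
                | cons z zs => exact ⟨_, List.getLast?_eq_some_getLast (by simp)⟩
              have hab : a ≤ b := pv_le_getLast h1 ha hb
              have hba : b ≤ a := h2 b (List.mem_of_getLast? hb) a (by simp)
              exact hlast (by rw [hb, le_antisymm hba hab])
            exact lt_of_le_of_ne hle hne
        have hp' : (acc ++ [t]).Pairwise (· < ·) := by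
          rw [List.pairwise_append]
          exact ⟨h1, by simp, by simpa using hlt⟩
        have h2' : ∀ a ∈ acc ++ [t], ∀ y ∈ ts, a ≤ y := by
          intro a ha y hy
          rcases List.mem_append.mp ha with h | h
          · exact h2 a h y (by simp [hy])
          · simp only [List.mem_singleton] at h; subst h
            exact (List.pairwise_cons.mp h3).1 y hy
        obtain ⟨hpw, hmem⟩ := ih (acc ++ [t]) hp' h2' (List.pairwise_cons.mp h3).2
        refine ⟨hpw, fun x => ?_⟩
        rw [hmem x]
        constructor
        · rintro (h | h)
          · rcases List.mem_append.mp h with h | h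
            · exact Or.inl h
            · simp only [List.mem_singleton] at h; subst h; exact Or.inr ⟨by simp, ht.1⟩
          · exact Or.inr ⟨by simp [h.1], h.2⟩
        · rintro (h | ⟨h, hne⟩)
          · exact Or.inl (List.mem_append.mpr (Or.inl h))
          · rcases List.mem_cons.mp h with h | h
            · subst h; exact Or.inl (by simp)
            · exact Or.inr ⟨h, hne⟩
      · have hstep : pvStepB acc t = acc := by simp only [pvStepB, if_neg ht]
        rw [hstep]
        have h2' : ∀ a ∈ acc, ∀ y ∈ ts, a ≤ y := fun a ha y hy => h2 a ha y (by simp [hy])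
        obtain ⟨hpw, hmem⟩ := ih acc h1 h2' (List.pairwise_cons.mp h3).2
        refine ⟨hpw, fun x => ?_⟩
        rw [hmem x]
        constructor
        · rintro (h | h)
          · exact Or.inl h
          · exact Or.inr ⟨by simp [h.1], h.2⟩
        · rintro (h | ⟨h, hne⟩)
          · exact Or.inl h
          · rcases List.mem_cons.mp h with h | h
            · subst h
              rcases not_and_or.mp ht with h' | h'
              · exact absurd hne (by simpa using h')
              · obtain ⟨-, h2'⟩ := not_or.mp h'
                exact Or.inl (List.mem_of_getLast? (not_not.mp h2'))
            · exact Or.inr ⟨h, hne⟩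

-- ASCII character-class facts, stated on toNat
theorem pv_isupper_iff (c : Char) : (PySem.Chars.isupper c = true) ↔ (65 ≤ c.toNat ∧ c.toNat ≤ 90) := by
  unfold PySem.Chars.isupper
  simp only [Bool.and_eq_true, decide_eq_true_eq, Char.le_def]
  exact Iff.rfl

theorem pv_islower_iff (c : Char) : (PySem.Chars.islower c = true) ↔ (97 ≤ c.toNat ∧ c.toNat ≤ 122) := by
  unfold PySem.Chars.islower
  simp only [Bool.and_eq_true, decide_eq_true_eq, Char.le_def]
  exact Iff.rfl

-- no char of a lowercased string is an ASCII uppercase letter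
theorem pv_lowerChar_not_upper (c : Char) : PySem.Chars.isupper (PySem.Chars.lowerChar c) = false := by
  unfold PySem.Chars.lowerChar
  by_cases h : PySem.Chars.isupper c = true
  · rw [if_pos h]
    have hb := (pv_isupper_iff c).mp h
    have ht : (Char.ofNat (c.toNat + 32)).toNat = c.toNat + 32 := by
      rw [Char.toNat_ofNat, if_pos (Or.inl (by omega))]
    rw [← Bool.not_eq_true, pv_isupper_iff]
    rintro ⟨h1, h2⟩
    omega
  · rw [if_neg h]; simpa using h

theorem pv_tok_not_upper (s : String) :
    ∀ c ∈ (pvTok s).toList, PySem.Chars.isupper c = false := by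
  intro c hc
  unfold pvTok at hc
  rw [PySem.Str.toList_lower] at hc
  unfold PySem.Chars.lower at hc
  rcases List.mem_map.mp hc with ⟨d, _, rfl⟩
  exact pv_lowerChar_not_upper d

-- every token of pvToks is a pvTok image
theorem pvToks_shape {genres : List String} {g : String} (h : g ∈ pvToks genres) :
    ∃ s, g = pvTok s := by
  rcases List.mem_flatMap.mp h with ⟨gg, _, hin⟩
  rcases List.mem_map.mp hin with ⟨p, _, rfl⟩
  exact ⟨p, rfl⟩

-- upperChar is injective on non-uppercase chars
theorem pv_upperChar_inj {c d : Char}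
    (hc : PySem.Chars.isupper c = false) (hd : PySem.Chars.isupper d = false)
    (h : PySem.Chars.upperChar c = PySem.Chars.upperChar d) : c = d := by
  unfold PySem.Chars.upperChar at h
  have hcu : ¬ (65 ≤ c.toNat ∧ c.toNat ≤ 90) := by rw [← pv_isupper_iff]; simp [hc]
  have hdu : ¬ (65 ≤ d.toNat ∧ d.toNat ≤ 90) := by rw [← pv_isupper_iff]; simp [hd]
  have toNatSub : ∀ (e : Char), PySem.Chars.islower e = true →
      (Char.ofNat (e.toNat - 32)).toNat = e.toNat - 32 := by
    intro e he
    have hb := (pv_islower_iff e).mp he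
    rw [Char.toNat_ofNat, if_pos (Or.inl (by omega))]
  by_cases h1 : PySem.Chars.islower c = true
  · by_cases h2 : PySem.Chars.islower d = true
    · rw [if_pos h1, if_pos h2] at h
      have e1 := toNatSub c h1
      have e2 := toNatSub d h2
      have hb1 := (pv_islower_iff c).mp h1
      have hb2 := (pv_islower_iff d).mp h2
      have heq : c.toNat - 32 = d.toNat - 32 := by rw [← e1, ← e2, h]
      have hv1 : c.val.toNat = c.toNat := rfl
      have hv2 : d.val.toNat = d.toNat := rfl
      exact Char.ext (UInt32.toNat_inj.mp (by omega))
    · exfalso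
      rw [if_pos h1, if_neg h2] at h
      have e1 := toNatSub c h1
      have hb1 := (pv_islower_iff c).mp h1
      have hdn : d.toNat = c.toNat - 32 := by rw [← h, e1]
      simp only [Char.toNat] at *
      exact hdu (by omega)
  · by_cases h2 : PySem.Chars.islower d = true
    · exfalso
      rw [if_neg h1, if_pos h2] at h
      have e2 := toNatSub d h2
      have hb2 := (pv_islower_iff d).mp h2
      have hcn : c.toNat = d.toNat - 32 := by rw [h, e2]
      simp only [Char.toNat] at *
      exact hcu (by omega)
    · rw [if_neg h1, if_neg h2] at h; exact h

theorem pvCap_empty_iff (s : String) : pyCapitalize s = "" ↔ s = "" := by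
  unfold pyCapitalize
  cases hs : s.toList with
  | nil =>
      have : s = "" := by have := congrArg String.ofList hs; simpa using this
      simp [this]
  | cons c rest =>
      have hsne : s ≠ "" := by
        intro h; rw [h] at hs; cases hs
      simp only [hsne, iff_false]
      intro hcontra
      have := congrArg String.toList hcontra
      simp at this

theorem pvCap_inj {s t : String}
    (hs : ∀ c ∈ s.toList, PySem.Chars.isupper c = false)
    (ht : ∀ c ∈ t.toList, PySem.Chars.isupper c = false)
    (h : pyCapitalize s = pyCapitalize t) : s = t := by
  unfold pyCapitalize at h
  cases hls : s.toList with
  | nil =>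
      cases hlt : t.toList with
      | nil =>
          have h1 : s = "" := by have := congrArg String.ofList hls; simpa using this
          have h2 : t = "" := by have := congrArg String.ofList hlt; simpa using this
          rw [h1, h2]
      | cons d rt =>
          rw [hls, hlt] at h
          have := congrArg String.toList h
          simp at this
  | cons c rs =>
      cases hlt : t.toList with
      | nil =>
          rw [hls, hlt] at h
          have := congrArg String.toList h
          simp at this
      | cons d rt =>
          rw [hls, hlt] at h
          have hl := congrArg String.toList h
          simp only [String.toList_ofList, List.cons.injEq] at hl
          have hceq : c = d :=
            pv_upperChar_inj (hs c (by rw [hls]; simp)) (ht d (by rw [hlt]; simp)) hl.1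
          have hrs : PySem.Chars.lower rs = rs := by
            unfold PySem.Chars.lower
            rw [List.map_congr_left (fun a ha => by
              unfold PySem.Chars.lowerChar
              rw [if_neg (by simp [hs a (by rw [hls]; simp [ha])])])]
            simp
          have hrt : PySem.Chars.lower rt = rt := by
            unfold PySem.Chars.lower
            rw [List.map_congr_left (fun a ha => by
              unfold PySem.Chars.lowerChar
              rw [if_neg (by simp [ht a (by rw [hlt]; simp [ha])])])]
            simp
          have hreq : rs = rt := by rw [← hrs, ← hrt, hl.2]
          have : s.toList = t.toList := by rw [hls, hlt, hceq, hreq]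
          rw [← String.ofList_toList (s := s), this, String.ofList_toList]

-- ===== VERDICT (by name: the statement is the Claim_ definition above) =====
theorem extract_unique_genres_spec : Claim_equal_extract_unique_genres := by
  intro genres _
  unfold Spec_extract_unique_genres
  have hBlist : (genres.flatMap (fun g =>
      (pySplitComma g).map (fun p => pyCapitalize (PySem.Str.lower (PySem.Str.strip p)))))
      = (pvToks genres).map pyCapitalize := by
    unfold pvToks
    rw [List.map_flatMap]
    simp only [List.map_map]
    have hfun : ∀ g : String, (pySplitComma g).map
        (fun p => pyCapitalize (PySem.Str.lower (PySem.Str.strip p)))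
        = (pySplitComma g).map (pyCapitalize ∘ pvTok) :=
      fun g => List.map_congr_left (fun p _ => by simp [pvTok, Function.comp])
    simp only [hfun]
  have hBdef : extract_unique_genres_alt genres
      = (PySem.List.sorted ((pvToks genres).map pyCapitalize) (fun x => x)).foldl pvStepB [] := by
    unfold extract_unique_genres_alt
    rw [hBlist]
    rfl
  set S := PySem.List.sorted ((pvToks genres).map pyCapitalize) (fun x => x) with hSdef
  have hS : S.Pairwise (· ≤ ·) := PySem.List.sorted_pairwise _ _
  obtain ⟨hpw, hmem⟩ := pvB_fold S [] (by simp) (by simp) hS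
  set r := S.foldl pvStepB [] with hrdef
  -- membership of r = membership of A's pre-sort list
  have hmemr : ∀ x, x ∈ r ↔ x ∈ ((PySem.Set.ofList (pvF genres)).map pyCapitalize) := by
    intro x
    rw [hmem x]
    simp only [List.mem_nil_iff, false_or]
    constructor
    · rintro ⟨hx, hne⟩
      rw [PySem.List.mem_sorted] at hx
      rcases List.mem_map.mp hx with ⟨g, hg, rfl⟩
      have hgne : g ≠ "" := by
        intro h; exact hne (by rw [h]; rfl)
      exact List.mem_map.mpr ⟨g, (PySem.Set.mem_ofList _ _).mpr
        (List.mem_filter.mpr ⟨hg, by simp [hgne]⟩), rfl⟩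
    · intro hx
      rcases List.mem_map.mp hx with ⟨g, hg, rfl⟩
      have hg' := (PySem.Set.mem_ofList _ _).mp hg
      have hgT : g ∈ pvToks genres := (List.mem_filter.mp hg').1
      have hgne : g ≠ "" := by simpa using (List.mem_filter.mp hg').2
      refine ⟨?_, ?_⟩
      · rw [PySem.List.mem_sorted]
        exact List.mem_map.mpr ⟨g, hgT, rfl⟩
      · intro h; exact hgne ((pvCap_empty_iff g).mp h)
  have hnodup0 : ((PySem.Set.ofList (pvF genres)).map pyCapitalize).Nodup := by
    apply List.Nodup.map_on ?_ (PySem.Set.nodup_ofList _)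
    intro x hx y hy hxy
    have hxT : x ∈ pvToks genres := (List.mem_filter.mp ((PySem.Set.mem_ofList _ _).mp hx)).1
    have hyT : y ∈ pvToks genres := (List.mem_filter.mp ((PySem.Set.mem_ofList _ _).mp hy)).1
    rcases pvToks_shape hxT with ⟨sx, rfl⟩
    rcases pvToks_shape hyT with ⟨sy, rfl⟩
    exact pvCap_inj (pv_tok_not_upper sx) (pv_tok_not_upper sy) hxy
  have hnodupr : r.Nodup := hpw.imp (fun h => ne_of_lt h)
  have hperm : List.Perm ((PySem.Set.ofList (pvF genres)).map pyCapitalize) r :=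
    (List.perm_ext_iff_of_nodup hnodup0 hnodupr).mpr (fun a => (hmemr a).symm)
  rw [pvA_closed, hBdef]
  exact PySem.List.sorted_eq_of_perm_of_pairwise_lt _ r (fun x => x) hperm.symm hpw
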